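-- pv_equiv track=rewrite | github.com/syncopatedGlitch/DSA | Problems/hackerrank/subarrays_with_sum_bounded.py | countSubarraysWithSumAndMaxAtMost
-- ===== SOURCE A (Python) =====
-- def countSubarraysWithSumAndMaxAtMost(nums, k, M):
--     # overall count
--     total_count = 0
--     # subarray sum problem specific variables.
--     current_sum = 0
--     prefix_sum_map = {0: 1}
--     for i in range(len(nums)):
--         # if current element is greater than upper
--         # bound, its a breaker point and can never be
--         # part of a valid subarray, so reset the
--         # subarray sum problem variables completely
--         # and start from next element after this one.
--         if nums[i] > M:
--             current_sum = 0
--             prefix_sum_map = {0: 1}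
--             continue
--         current_sum += nums[i]
--         prefix_sum = current_sum - k
--         if prefix_sum_map.get(prefix_sum):
--             total_count += 1
--             prefix_sum_map[prefix_sum] += 1
--         else:
--             prefix_sum_map[prefix_sum] = 1
--     return total_count
-- ===== SOURCE B (Python) =====
-- def _segments(nums, M):
--     # split nums into segments of elements <= M (elements > M are separators)
--     segs, cur = [], []
--     for v in nums:
--         if v > M:
--             segs.append(cur)
--             cur = []
--         else:
--             cur.append(v)
--     segs.append(cur)
--     return segs
--
--
-- def _count_segment(seg, k):
--     # count positions whose prefix sum equals k or repeats an earlier prefix sum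
--     count, s, seen = 0, 0, set()
--     for v in seg:
--         s += v
--         if s == k or s in seen:
--             count += 1
--         seen.add(s)
--     return count
--
--
-- def countSubarraysWithSumAndMaxAtMost(nums, k, M):
--     return sum(_count_segment(seg, k) for seg in _segments(nums, M))
-- ===== Notes on version B (the rewrite author's own statement) =====
-- stated objective: alternative
-- what changed: A's single pass with a dict mapping shifted prefix sums (current_sum-k) to counts and an inline reset branch is replaced by first splitting nums into maximal segments of elements <= M and then, per segment, counting positions whose prefix sum equals k or repeats an earlier prefix sum, kept in a set instead of a count dict.
import Mathlib
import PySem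

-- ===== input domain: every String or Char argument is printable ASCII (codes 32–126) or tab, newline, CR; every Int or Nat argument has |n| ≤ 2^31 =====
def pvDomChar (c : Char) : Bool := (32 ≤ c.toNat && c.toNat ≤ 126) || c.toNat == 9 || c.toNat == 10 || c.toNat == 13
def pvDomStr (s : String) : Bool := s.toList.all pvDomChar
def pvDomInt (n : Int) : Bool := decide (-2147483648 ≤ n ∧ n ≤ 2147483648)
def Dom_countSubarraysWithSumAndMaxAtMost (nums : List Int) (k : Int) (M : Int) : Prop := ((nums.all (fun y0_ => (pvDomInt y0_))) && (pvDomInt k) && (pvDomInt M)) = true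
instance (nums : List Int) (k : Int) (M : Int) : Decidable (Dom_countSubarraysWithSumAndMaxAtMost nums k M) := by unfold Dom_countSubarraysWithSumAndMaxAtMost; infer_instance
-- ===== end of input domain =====

-- B replaces A's running shifted-prefix dict of counts by a segmentation into runs of elements ≤ M
-- plus a per-segment set of seen prefix sums (objective: simpler decomposition, same cost).


-- ===== PORT A =====
-- one loop step of A: state = (total_count, current_sum, prefix_sum_map)
def stepA (k : Int) (M : Int) (st : Int × Int × PySem.Dict Int Int) (v : Int) :
    Int × Int × PySem.Dict Int Int :=
  if v > M then (st.1, 0, PySem.Dict.insert PySem.Dict.empty 0 1)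
  else
    let cs := st.2.1 + v
    let p := cs - k
    -- 'if prefix_sum_map.get(prefix_sum):' — truthy iff the stored count is nonzero (None ↦ 0)
    if st.2.2.getD p 0 ≠ 0 then (st.1 + 1, cs, st.2.2.modify p 0 (· + 1))
    else (st.1, cs, st.2.2.insert p 1)

def countSubarraysWithSumAndMaxAtMost (nums : List Int) (k : Int) (M : Int) : Int :=
  (nums.foldl (stepA k M) (0, 0, PySem.Dict.insert PySem.Dict.empty 0 1)).1

-- ===== PORT B =====
-- split nums into segments of elements ≤ M (elements > M are separators)
def pvSegStep (M : Int) (st : List (List Int) × List Int) (v : Int) : List (List Int) × List Int :=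
  if v > M then (st.1 ++ [st.2], []) else (st.1, st.2 ++ [v])

def pvSegments (nums : List Int) (M : Int) : List (List Int) :=
  let st := nums.foldl (pvSegStep M) ([], [])
  st.1 ++ [st.2]

-- one inner step: state = (count, s, seen)
def stepB (k : Int) (st : Int × Int × PySem.Set Int) (v : Int) : Int × Int × PySem.Set Int :=
  let s := st.2.1 + v
  ((if s == k || st.2.2.contains s then st.1 + 1 else st.1), s, st.2.2.add s)

def pvCountSegment (seg : List Int) (k : Int) : Int :=
  (seg.foldl (stepB k) (0, 0, PySem.Set.ofList [])).1

def countSubarraysWithSumAndMaxAtMost_alt (nums : List Int) (k : Int) (M : Int) : Int :=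
  (pvSegments nums M).foldl (fun t seg => t + pvCountSegment seg k) 0

-- ===== PRECONDITION & SPEC =====
def Spec_countSubarraysWithSumAndMaxAtMost (nums : List Int) (k : Int) (M : Int) (out : Int) : Prop := out = countSubarraysWithSumAndMaxAtMost_alt nums k M
instance (nums : List Int) (k : Int) (M : Int) (out : Int) : Decidable (Spec_countSubarraysWithSumAndMaxAtMost nums k M out) := by unfold Spec_countSubarraysWithSumAndMaxAtMost; infer_instance

-- ===== CLAIM (what is proved, stated in full; the proofs are below) =====
def Claim_equal_countSubarraysWithSumAndMaxAtMost : Prop := ∀ (nums : List Int) (k : Int) (M : Int), Dom_countSubarraysWithSumAndMaxAtMost nums k M → Spec_countSubarraysWithSumAndMaxAtMost nums k M (countSubarraysWithSumAndMaxAtMost nums k M)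

-- ===== LEMMAS AND PROOFS =====

-- flat form of B: one pass with a reset at separators (proof-only intermediate)
def stepF (k : Int) (M : Int) (st : Int × Int × PySem.Set Int) (v : Int) :
    Int × Int × PySem.Set Int :=
  if v > M then (st.1, 0, PySem.Set.ofList []) else stepB k st v

-- invariant tying A's dict to B's seen-set
def InvAB (k : Int) (m : PySem.Dict Int Int) (seen : PySem.Set Int) : Prop :=
  (∀ x : Int, m.getD x 0 ≠ 0 ↔ (x = 0 ∨ (x + k) ∈ seen)) ∧ (∀ x : Int, 0 ≤ m.getD x 0)

theorem invAB_init (k : Int) : InvAB k (PySem.Dict.insert PySem.Dict.empty 0 1) (PySem.Set.ofList []) := by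
  refine ⟨fun x => ?_, fun x => ?_⟩ <;>
    rw [PySem.Dict.getD_insert] <;> split <;>
    simp_all [PySem.Dict.getD_empty, PySem.Set.ofList]

theorem invAB_step (k M : Int) (t t' cs : Int) (m : PySem.Dict Int Int) (seen : PySem.Set Int)
    (h : InvAB k m seen) (v : Int) (hv : ¬ v > M) :
    (stepA k M (t, cs, m) v).1 = t + ((stepF k M (t', cs, seen) v).1 - t') ∧
    (stepA k M (t, cs, m) v).2.1 = (stepF k M (t', cs, seen) v).2.1 ∧
    InvAB k (stepA k M (t, cs, m) v).2.2 (stepF k M (t', cs, seen) v).2.2 := by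
  obtain ⟨h1, h2⟩ := h
  have hcond : (m.getD (cs + v - k) 0 ≠ 0) ↔ ((cs + v == k || seen.contains (cs + v)) = true) := by
    rw [h1 (cs + v - k)]
    simp [PySem.Set.contains, sub_eq_zero, sub_add_cancel]
  simp only [stepA, stepF, stepB, if_neg hv]
  by_cases hc : m.getD (cs + v - k) 0 ≠ 0
  · have hb := hcond.mp hc
    rw [if_pos hc, if_pos hb]
    dsimp only
    refine ⟨by ring, rfl, ?_, ?_⟩ <;> intro x
    · rw [PySem.Dict.getD_modify, PySem.Set.mem_add]
      split
      · rename_i hx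
        have := h2 (cs + v - k)
        constructor
        · intro _; right; right; omega
        · intro _; omega
      · rename_i hx
        rw [h1 x]
        constructor
        · rintro (h | h) <;> simp [h]
        · rintro (h | h | h)
          · exact Or.inl h
          · exact Or.inr h
          · exact absurd (by omega : x = cs + v - k) hx
    · rw [PySem.Dict.getD_modify]
      split
      · have := h2 (cs + v - k); omega
      · exact h2 x
  · have hb : (cs + v == k || seen.contains (cs + v)) = false := by
      cases hB : (cs + v == k || seen.contains (cs + v))
      · rfl
      · exact absurd (hcond.mpr hB) hc
    rw [if_neg hc, if_neg (by rw [hb]; exact Bool.false_ne_true)]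
    dsimp only
    refine ⟨by ring, rfl, ?_, ?_⟩ <;> intro x
    · rw [PySem.Dict.getD_insert, PySem.Set.mem_add]
      split
      · rename_i hx
        constructor
        · intro _; right; right; omega
        · intro _; norm_num
      · rename_i hx
        rw [h1 x]
        constructor
        · rintro (h | h) <;> simp [h]
        · rintro (h | h | h)
          · exact Or.inl h
          · exact Or.inr h
          · exact absurd (by omega : x = cs + v - k) hx
    · rw [PySem.Dict.getD_insert]
      split
      · norm_num
      · exact h2 x

-- A's fold equals the flat fold, given the invariant
theorem foldA_eq_foldF (k M : Int) : ∀ (xs : List Int) (t t' cs : Int)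
    (m : PySem.Dict Int Int) (seen : PySem.Set Int), InvAB k m seen →
    (xs.foldl (stepA k M) (t, cs, m)).1 = t + ((xs.foldl (stepF k M) (t', cs, seen)).1 - t') := by
  intro xs
  induction xs with
  | nil => intro t t' cs m seen _; simp
  | cons v xs ih =>
    intro t t' cs m seen h
    by_cases hv : v > M
    · simp only [List.foldl_cons]
      rw [show stepA k M (t, cs, m) v = (t, 0, PySem.Dict.insert PySem.Dict.empty 0 1) from by
            simp [stepA, hv],
          show stepF k M (t', cs, seen) v = (t', 0, PySem.Set.ofList []) from by
            simp [stepF, hv]]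
      exact ih t t' 0 _ _ (invAB_init k)
    · obtain ⟨e1, e2, hinv⟩ := invAB_step k M t t' cs m seen h v hv
      simp only [List.foldl_cons]
      rw [show (stepA k M (t, cs, m) v) =
        ((stepA k M (t, cs, m) v).1, (stepA k M (t, cs, m) v).2.1, (stepA k M (t, cs, m) v).2.2) from rfl,
        show (stepF k M (t', cs, seen) v) =
        ((stepF k M (t', cs, seen) v).1, (stepF k M (t', cs, seen) v).2.1, (stepF k M (t', cs, seen) v).2.2) from rfl]
      rw [ih ((stepA k M (t, cs, m) v).1) ((stepF k M (t', cs, seen) v).1)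
            ((stepA k M (t, cs, m) v).2.1) ((stepA k M (t, cs, m) v).2.2)
            ((stepF k M (t', cs, seen) v).2.2) hinv, e1, e2]
      ring

-- stepB's count is additive in the initial count
theorem stepB_shift (k T0 t s : Int) (seen : PySem.Set Int) (v : Int) :
    stepB k (T0 + t, s, seen) v =
      (T0 + (stepB k (t, s, seen) v).1, (stepB k (t, s, seen) v).2.1, (stepB k (t, s, seen) v).2.2) := by
  simp only [stepB]
  split
  · simp; ring
  · simp

-- segment accumulator splits off
theorem segFold_acc (M : Int) : ∀ (xs : List Int) (acc : List (List Int)) (cur : List Int),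
    xs.foldl (pvSegStep M) (acc, cur) =
      (acc ++ (xs.foldl (pvSegStep M) ([], cur)).1, (xs.foldl (pvSegStep M) ([], cur)).2) := by
  intro xs
  induction xs with
  | nil => intro acc cur; simp
  | cons v xs ih =>
    intro acc cur
    simp only [List.foldl_cons, pvSegStep]
    by_cases hv : v > M
    · simp only [if_pos hv, List.nil_append]
      rw [ih (acc ++ [cur]) [], ih [cur] []]
      simp
    · simp only [if_neg hv]
      exact ih acc (cur ++ [v])

-- flat fold equals the segmented sum
theorem foldF_eq_segments (k M : Int) : ∀ (xs : List Int) (T0 : Int) (cur : List Int),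
    (xs.foldl (stepF k M) (T0 + (cur.foldl (stepB k) (0, 0, PySem.Set.ofList [])).1,
        (cur.foldl (stepB k) (0, 0, PySem.Set.ofList [])).2.1,
        (cur.foldl (stepB k) (0, 0, PySem.Set.ofList [])).2.2)).1 =
      T0 + ((xs.foldl (pvSegStep M) ([], cur)).1 ++ [(xs.foldl (pvSegStep M) ([], cur)).2]).foldl
        (fun t seg => t + pvCountSegment seg k) 0 := by
  intro xs
  induction xs with
  | nil =>
    intro T0 cur
    simp [pvCountSegment]
  | cons v xs ih =>
    intro T0 cur
    by_cases hv : v > M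
    · simp only [List.foldl_cons, stepF, pvSegStep, if_pos hv]
      have h0 : ([] : List Int).foldl (stepB k) ((0 : Int), (0 : Int), PySem.Set.ofList []) = (0, 0, PySem.Set.ofList []) := rfl
      have hih := ih (T0 + (cur.foldl (stepB k) (0, 0, PySem.Set.ofList [])).1) []
      rw [h0] at hih
      simp only [add_zero] at hih
      rw [hih]
      simp only [List.nil_append]
      rw [segFold_acc M xs [cur] []]
      simp only [PySem.List.foldl_add, List.map_append, List.sum_append, List.map_cons,
        List.map_nil, List.sum_cons, List.sum_nil, pvCountSegment]
      ring
    · simp only [List.foldl_cons, pvSegStep, if_neg hv]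
      have hstep : stepF k M (T0 + (cur.foldl (stepB k) (0, 0, PySem.Set.ofList [])).1,
          (cur.foldl (stepB k) (0, 0, PySem.Set.ofList [])).2.1,
          (cur.foldl (stepB k) (0, 0, PySem.Set.ofList [])).2.2) v =
          (T0 + ((cur ++ [v]).foldl (stepB k) (0, 0, PySem.Set.ofList [])).1,
           ((cur ++ [v]).foldl (stepB k) (0, 0, PySem.Set.ofList [])).2.1,
           ((cur ++ [v]).foldl (stepB k) (0, 0, PySem.Set.ofList [])).2.2) := by
        rw [List.foldl_append]
        simp only [List.foldl_cons, List.foldl_nil]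
        rw [show (cur.foldl (stepB k) ((0:Int), (0:Int), PySem.Set.ofList [])) =
          ((cur.foldl (stepB k) (0, 0, PySem.Set.ofList [])).1,
           (cur.foldl (stepB k) (0, 0, PySem.Set.ofList [])).2.1,
           (cur.foldl (stepB k) (0, 0, PySem.Set.ofList [])).2.2) from rfl]
        rw [stepF, if_neg hv, stepB_shift]
      rw [hstep]
      exact ih T0 (cur ++ [v])

-- ===== VERDICT (by name: the statement is the Claim_ definition above) =====
theorem countSubarraysWithSumAndMaxAtMost_spec : Claim_equal_countSubarraysWithSumAndMaxAtMost := by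
  intro nums k M _
  unfold Spec_countSubarraysWithSumAndMaxAtMost
  unfold countSubarraysWithSumAndMaxAtMost countSubarraysWithSumAndMaxAtMost_alt pvSegments
  rw [foldA_eq_foldF k M nums 0 0 0 _ _ (invAB_init k)]
  have hF := foldF_eq_segments k M nums 0 []
  simp only [List.foldl_nil, add_zero, zero_add] at hF
  rw [hF]
  ring
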